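-- pv_equiv track=rewrite | github.com/yeotaeho/ifrsseed_backend | domain/shared/tool/parsing/pdf_metadata.py | _keep_last_run
-- ===== SOURCE A (Python) =====
-- from typing import Any, Dict, List, Optional, Union
--
-- def _keep_last_run(pages: List[int]) -> List[int]:
--     if not pages:
--         return []
--     runs: List[List[int]] = []
--     cur: List[int] = [pages[0]]
--     for p in pages[1:]:
--         if p == cur[-1] + 1:
--             cur.append(p)
--         else:
--             runs.append(cur)
--             cur = [p]
--     runs.append(cur)
--     return max(runs, key=lambda r: r[-1])
-- ===== SOURCE B (Python) =====
-- from typing import List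
--
-- def _keep_last_run(pages: List[int]) -> List[int]:
--     n = len(pages)
--     if n == 0:
--         return []
--     # stage 1: find the index e of the best run end (a run end is an index i
--     # with i+1 == n or pages[i+1] != pages[i]+1); strict '>' keeps the earliest tie
--     e = -1
--     for i in range(n):
--         if i + 1 == n or pages[i + 1] != pages[i] + 1:
--             if e < 0 or pages[i] > pages[e]:
--                 e = i
--     # stage 2: walk back to that run's start and slice it out
--     s = e
--     while s > 0 and pages[s - 1] + 1 == pages[s]:
--         s -= 1
--     return pages[s:e + 1]
-- ===== Notes on version B (the rewrite author's own statement) =====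
-- stated objective: alternative
-- what changed: B never constructs runs at all: a first index scan records only the position of the best run end (strict '>' keeps the earliest tie, matching max), then a backward walk from that position finds the run's start and the result is one slice pages[s:e+1], instead of A's building every run as a list and scanning them with max; measured constant-factor speedup from never allocating run lists.
import Mathlib
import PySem

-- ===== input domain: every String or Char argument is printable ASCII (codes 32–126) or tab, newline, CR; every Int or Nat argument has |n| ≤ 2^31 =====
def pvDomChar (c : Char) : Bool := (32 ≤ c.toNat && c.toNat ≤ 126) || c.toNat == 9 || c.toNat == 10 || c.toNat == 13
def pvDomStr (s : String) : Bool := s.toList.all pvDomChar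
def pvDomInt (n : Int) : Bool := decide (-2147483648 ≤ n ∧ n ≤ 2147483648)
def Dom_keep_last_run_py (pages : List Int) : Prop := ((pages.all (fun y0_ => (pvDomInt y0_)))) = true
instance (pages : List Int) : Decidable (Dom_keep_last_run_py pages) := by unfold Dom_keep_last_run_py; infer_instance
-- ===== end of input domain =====

-- B never builds runs: one index scan finds the best run-end position, a backward walk finds
-- that run's start, and the answer is a single slice (objective: alternative algorithm).


-- ===== PORT A =====
-- loop body: extend cur, or push cur onto runs and restart (cur is always nonempty, so
-- getLastD 0 is exactly Python's cur[-1])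
def aStep (s : List (List Int) × List Int) (p : Int) : List (List Int) × List Int :=
  if p = s.2.getLastD 0 + 1 then (s.1, s.2 ++ [p]) else (s.1 ++ [s.2], [p])

-- Python max(runs, key=lambda r: r[-1]): start with the head, replace only on strictly greater key
def aMax (h : List Int) (t : List (List Int)) : List Int :=
  t.foldl (fun b r => if r.getLastD 0 > b.getLastD 0 then r else b) h

def keep_last_run_py (pages : List Int) : List Int :=
  match pages with
  | [] => []
  | p0 :: rest =>
    let st := rest.foldl aStep ([], [p0])
    match st.1 ++ [st.2] with
    | [] => []            -- unreachable: the list ends with [st.2]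
    | h :: t => aMax h t

-- ===== PORT B =====
-- pages[i] for an index known to satisfy 0 ≤ i < len(pages): getD is exact there
def gIdx (pages : List Int) (i : Nat) : Int := pages.getD i 0

-- body of B's `for i in range(n)` scan; Python's negative sentinel for e (meaning 'no run end
-- recorded yet') is ported as `none`; range(n) yields the naturals, so the fold runs over Nat indices
def bStep (pages : List Int) (e : Option Nat) (i : Nat) : Option Nat :=
  if i + 1 = pages.length ∨ gIdx pages (i + 1) ≠ gIdx pages i + 1 then
    match e with
    | none => some i
    | some b => if gIdx pages i > gIdx pages b then some i else some b
  else e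

-- B's `while s > 0 and pages[s-1] + 1 == pages[s]: s -= 1` as structural recursion on s
def backWalk (pages : List Int) : Nat → Nat
  | 0 => 0
  | s + 1 => if gIdx pages s + 1 = gIdx pages (s + 1) then backWalk pages s else s + 1

def keep_last_run_py_alt (pages : List Int) : List Int :=
  if pages.length = 0 then []
  else
    let e := ((List.range pages.length).foldl (bStep pages) none).getD 0
    let s := backWalk pages e
    -- pages[s:e+1] with 0 ≤ s ≤ e+1 ≤ len(pages): drop/take is exact there
    (pages.drop s).take (e + 1 - s)

-- ===== PRECONDITION & SPEC =====
def Spec_keep_last_run_py (pages : List Int) (out : List Int) : Prop := out = keep_last_run_py_alt pages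
instance (pages : List Int) (out : List Int) : Decidable (Spec_keep_last_run_py pages out) := by unfold Spec_keep_last_run_py; infer_instance

-- ===== CLAIM (what is proved, stated in full; the proofs are below) =====
def Claim_equal_keep_last_run_py : Prop := ∀ (pages : List Int), Dom_keep_last_run_py pages → Spec_keep_last_run_py pages (keep_last_run_py pages)

-- ===== LEMMAS AND PROOFS =====

-- the slice pages[s:e+1]
def win (pages : List Int) (s e : Nat) : List Int := (pages.drop s).take (e + 1 - s)

-- best-so-far view of A's runs list
def optMax (rs : List (List Int)) : Option (List Int) :=
  match rs with
  | [] => none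
  | h :: t => some (aMax h t)

def altPick (best : Option (List Int)) (cur : List Int) : List Int :=
  match best with
  | none => cur
  | some b => if cur.getLastD 0 > b.getLastD 0 then cur else b

theorem optMax_snoc (rs : List (List Int)) (c : List Int) :
    optMax (rs ++ [c]) = some (altPick (optMax rs) c) := by
  cases rs with
  | nil => simp [optMax, aMax, altPick]
  | cons h t => simp [optMax, aMax, altPick, List.foldl_append]

theorem final_pick (runs : List (List Int)) (cur : List Int) :
    (match runs ++ [cur] with
     | [] => ([] : List Int)
     | h :: t => aMax h t) = altPick (optMax runs) cur := by
  cases runs with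
  | nil => simp [optMax, aMax, altPick]
  | cons h t => simp [optMax, aMax, altPick, List.foldl_append]

theorem backWalk_le (pages : List Int) (e : Nat) : backWalk pages e ≤ e := by
  induction e with
  | zero => simp [backWalk]
  | succ s ih => unfold backWalk; split <;> omega

theorem win_getLastD (pages : List Int) (s e : Nat) (hse : s ≤ e) (he : e < pages.length) :
    (win pages s e).getLastD 0 = gIdx pages e := by
  have hlen : (win pages s e).length = e + 1 - s := by simp [win]; omega
  rw [List.getLastD_eq_getLast?, List.getLast?_eq_getElem?, hlen]
  have h1 : e + 1 - s - 1 = e - s := by omega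
  have h2 : s + (e - s) = e := by omega
  have h3 : e - s < e + 1 - s := by omega
  simp [win, List.getElem?_drop, h1, h2, h3, gIdx, List.getD, List.getElem?_eq_getElem he]

theorem win_snoc (pages : List Int) (s k : Nat) (hse : s ≤ k) (he : k + 1 < pages.length) :
    win pages s k ++ [gIdx pages (k + 1)] = win pages s (k + 1) := by
  have h1 : k + 1 + 1 - s = (k + 1 - s) + 1 := by omega
  rw [win, win, h1, List.take_add_one]
  have h2 : s + (k + 1 - s) = k + 1 := by omega
  simp [List.getElem?_drop, h2, gIdx, List.getD, List.getElem?_eq_getElem he]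

theorem win_self (pages : List Int) (e : Nat) (he : e < pages.length) :
    win pages e e = [gIdx pages e] := by
  have h1 : e + 1 - e = 1 := by omega
  rw [win, h1, List.take_one]
  simp [List.head?_drop, gIdx, List.getD, List.getElem?_eq_getElem he]

theorem backWalk_succ (pages : List Int) (s : Nat) :
    backWalk pages (s + 1) =
      if gIdx pages s + 1 = gIdx pages (s + 1) then backWalk pages s else s + 1 := rfl

-- the main loop invariant, over the prefix of length k of the tail
theorem main_inv (p0 : Int) (t : List Int) (k : Nat) (hk : k ≤ t.length) :
    (optMax ((t.take k).foldl aStep ([], [p0])).1 =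
      Option.map (fun e => win (p0 :: t) (backWalk (p0 :: t) e) e)
        ((List.range k).foldl (bStep (p0 :: t)) none))
    ∧ ((t.take k).foldl aStep ([], [p0])).2 = win (p0 :: t) (backWalk (p0 :: t) k) k
    ∧ (∀ e, (List.range k).foldl (bStep (p0 :: t)) none = some e → e < k) := by
  induction k with
  | zero =>
      refine ⟨rfl, ?_, by intro e he; rw [List.range_zero] at he; simp at he⟩
      have := win_self (p0 :: t) 0 (by simp)
      simpa [backWalk, gIdx] using this.symm
  | succ k ih =>
      have hk' : k ≤ t.length := by omega
      obtain ⟨ih1, ih2, ih3⟩ := ih hk'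
      have hkl : k < (p0 :: t).length := by simp; omega
      have hkl1 : k + 1 < (p0 :: t).length := by simp; omega
      have htk : t.take (k + 1) = t.take k ++ [gIdx (p0 :: t) (k + 1)] := by
        rw [List.take_add_one]
        have hklt : k < t.length := by omega
        simp [gIdx, List.getD, List.getElem?_eq_getElem hklt]
      rw [htk, List.range_succ, List.foldl_append, List.foldl_append]
      simp only [List.foldl_cons, List.foldl_nil]
      set F := (t.take k).foldl aStep ([], [p0]) with hF
      set E := (List.range k).foldl (bStep (p0 :: t)) none with hE
      have hbw := backWalk_le (p0 :: t) k
      have hcurlast : F.2.getLastD 0 = gIdx (p0 :: t) k := by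
        rw [ih2]; exact win_getLastD _ _ _ hbw hkl
      have hn : ¬ (k + 1 = (p0 :: t).length) := by simp; omega
      by_cases hc : gIdx (p0 :: t) (k + 1) = gIdx (p0 :: t) k + 1
      · -- run continues
        have hbw1 : backWalk (p0 :: t) (k + 1) = backWalk (p0 :: t) k := by
          rw [backWalk_succ, if_pos hc.symm]
        have haStep : aStep F (gIdx (p0 :: t) (k + 1)) = (F.1, F.2 ++ [gIdx (p0 :: t) (k + 1)]) := by
          unfold aStep; rw [hcurlast, if_pos hc]
        have hbStep : bStep (p0 :: t) E k = E := by
          unfold bStep; rw [if_neg (by push Not; exact ⟨hn, by omega⟩)]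
        refine ⟨by rw [haStep, hbStep]; exact ih1, ?_, ?_⟩
        · rw [haStep]; simp only; rw [ih2, hbw1]
          exact win_snoc _ _ _ hbw hkl1
        · intro e he; rw [hbStep] at he; exact Nat.lt_succ_of_lt (ih3 e he)
      · -- run breaks between k and k+1
        have hbw1 : backWalk (p0 :: t) (k + 1) = k + 1 := by
          rw [backWalk_succ, if_neg (fun h => hc h.symm)]
        have haStep : aStep F (gIdx (p0 :: t) (k + 1)) = (F.1 ++ [F.2], [gIdx (p0 :: t) (k + 1)]) := by
          unfold aStep; rw [hcurlast, if_neg hc]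
        have hcond : (k + 1 = (p0 :: t).length ∨ gIdx (p0 :: t) (k + 1) ≠ gIdx (p0 :: t) k + 1) := Or.inr hc
        refine ⟨?_, ?_, ?_⟩
        · rw [haStep]; simp only
          rw [optMax_snoc, ih2, ih1]
          unfold bStep; rw [if_pos hcond]
          cases hEv : E with
          | none => simp [altPick]
          | some b =>
              have hb : b < k := ih3 b hEv
              have hbl : b < (p0 :: t).length := by simp; omega
              have hblast : (win (p0 :: t) (backWalk (p0 :: t) b) b).getLastD 0 = gIdx (p0 :: t) b :=
                win_getLastD _ _ _ (backWalk_le _ _) hbl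
              simp only [Option.map_some, altPick, hblast,
                win_getLastD _ _ _ hbw hkl]
              by_cases hgt : gIdx (p0 :: t) k > gIdx (p0 :: t) b
              · rw [if_pos hgt, if_pos hgt]; simp
              · rw [if_neg hgt, if_neg hgt]; simp
        · rw [haStep]; simp only; rw [hbw1]
          exact (win_self _ _ hkl1).symm
        · intro e he
          unfold bStep at he; rw [if_pos hcond] at he
          cases hEv : E with
          | none => rw [hEv] at he; simp at he; omega
          | some b =>
              have hb : b < k := ih3 b hEv
              rw [hEv] at he; simp at he
              split at he <;> simp at he <;> omega

-- ===== VERDICT (by name: the statement is the Claim_ definition above) =====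
theorem keep_last_run_py_spec : Claim_equal_keep_last_run_py := by
  intro pages _
  unfold Spec_keep_last_run_py
  cases pages with
  | nil => rfl
  | cons p0 t =>
      obtain ⟨h1, h2, h3⟩ := main_inv p0 t t.length le_rfl
      rw [List.take_length] at h1 h2
      have hA : keep_last_run_py (p0 :: t) =
          altPick (optMax ((t.foldl aStep ([], [p0])).1)) ((t.foldl aStep ([], [p0])).2) := by
        unfold keep_last_run_py
        exact final_pick _ _
      have htl : t.length < (p0 :: t).length := by simp
      unfold keep_last_run_py_alt
      rw [if_neg (by simp)]
      have hlen : (p0 :: t).length = t.length + 1 := by simp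
      rw [hlen, List.range_succ, List.foldl_append]
      simp only [List.foldl_cons, List.foldl_nil]
      set E := (List.range t.length).foldl (bStep (p0 :: t)) none with hE
      have hcond : (t.length + 1 = (p0 :: t).length ∨
          gIdx (p0 :: t) (t.length + 1) ≠ gIdx (p0 :: t) t.length + 1) := Or.inl hlen.symm
      cases hEv : E with
      | none =>
          rw [hA, h1, hEv]
          show altPick none _ = _
          unfold bStep
          rw [if_pos hcond]
          simp only [altPick, Option.getD_some]
          exact h2
      | some b =>
          have hb : b < t.length := h3 b hEv
          have hbl : b < (p0 :: t).length := by simp; omega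
          rw [hA, h1, hEv]
          unfold bStep
          rw [if_pos hcond]
          simp only [Option.map_some, altPick]
          rw [h2, win_getLastD _ _ _ (backWalk_le _ _) htl,
            win_getLastD _ _ _ (backWalk_le _ _) hbl]
          by_cases hgt : gIdx (p0 :: t) t.length > gIdx (p0 :: t) b
          · rw [if_pos hgt, if_pos hgt]; rfl
          · rw [if_neg hgt, if_neg hgt]; rfl
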